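-- pv_equiv track=rewrite | github.com/mbrosenuw/dmsklone | Code/Hamiltonians/torham.py | gettorblocks4
-- ===== SOURCE A (Python) =====
-- def gettorblocks4(basis):
--     blocks = {}
--     for idx, (m, l,g) in enumerate(basis):
--         if (l,g) not in blocks:
--             blocks[(l,g)] = {"start": idx, "end": idx, "count": 1}
--         else:
--             blocks[(l,g)]["end"] = idx
--             blocks[(l,g)]["count"] += 1
--     return blocks
-- ===== SOURCE B (Python) =====
-- def gettorblocks4(basis):
--     groups = {}
--     for idx, (m, l, g) in enumerate(basis):
--         groups.setdefault((l, g), []).append(idx)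
--     return {k: {"start": v[0], "end": v[-1], "count": len(v)}
--             for k, v in groups.items()}
-- ===== Notes on version B (the rewrite author's own statement) =====
-- stated objective: simpler
-- what changed: B collects, per (l,g) key, the list of indices where it occurs (setdefault+append) and derives start/end/count in a separate aggregation comprehension, instead of A's in-loop scalar bookkeeping with a membership branch and in-place field updates.
import Mathlib
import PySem

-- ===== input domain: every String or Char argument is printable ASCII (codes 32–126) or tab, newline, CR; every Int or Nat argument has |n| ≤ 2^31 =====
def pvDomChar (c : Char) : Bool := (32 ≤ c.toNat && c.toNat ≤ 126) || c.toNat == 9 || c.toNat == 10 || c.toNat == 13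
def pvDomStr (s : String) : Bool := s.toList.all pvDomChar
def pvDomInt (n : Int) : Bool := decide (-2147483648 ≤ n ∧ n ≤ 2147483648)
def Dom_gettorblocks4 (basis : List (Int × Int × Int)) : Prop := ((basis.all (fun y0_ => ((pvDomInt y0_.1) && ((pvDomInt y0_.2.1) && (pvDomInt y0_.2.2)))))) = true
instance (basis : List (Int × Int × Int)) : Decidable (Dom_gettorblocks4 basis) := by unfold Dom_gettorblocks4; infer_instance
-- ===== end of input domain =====

-- B groups the indices per (l,g) key (setdefault + append) and derives start/end/count
-- in a second aggregation pass, instead of A's in-loop scalar bookkeeping; same cost, simpler.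

-- ===== PORT A =====
-- one loop iteration of A: membership branch, then in-place field updates on the inner dict
def gettorAStep (blocks : PySem.Dict (Int × Int) (PySem.Dict String Int))
    (p : Int × (Int × Int × Int)) : PySem.Dict (Int × Int) (PySem.Dict String Int) :=
  let idx := p.1
  let l := p.2.2.1
  let g := p.2.2.2
  if blocks.contains (l, g) = false then
    blocks.insert (l, g) (PySem.Dict.ofList [("start", idx), ("end", idx), ("count", 1)])
  else
    -- blocks[(l,g)]["end"] = idx
    let b1 := blocks.modify (l, g) PySem.Dict.empty (fun inner => inner.insert "end" idx)
    -- blocks[(l,g)]["count"] += 1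
    b1.modify (l, g) PySem.Dict.empty (fun inner => inner.insert "count" (inner.getD "count" 0 + 1))

def gettorblocks4 (basis : List (Int × Int × Int)) : List (Int × Int × List (String × Int)) :=
  (((PySem.List.enumerate basis).foldl gettorAStep PySem.Dict.empty).items).map
    (fun p => (p.1.1, p.1.2, p.2.items))

-- ===== PORT B =====
-- groups.setdefault((l,g), []).append(idx)  ==  modify with default [] appending idx
def gettorBStep (groups : PySem.Dict (Int × Int) (List Int))
    (p : Int × (Int × Int × Int)) : PySem.Dict (Int × Int) (List Int) :=
  groups.modify (p.2.2.1, p.2.2.2) [] (· ++ [p.1])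

def gettorblocks4_alt (basis : List (Int × Int × Int)) : List (Int × Int × List (String × Int)) :=
  (((PySem.List.enumerate basis).foldl gettorBStep PySem.Dict.empty).items).map (fun p =>
    (p.1.1, p.1.2, [("start", p.2.headD 0), ("end", p.2.getLastD 0), ("count", (p.2.length : Int))]))

-- ===== PRECONDITION & SPEC =====
def Spec_gettorblocks4 (basis : List (Int × Int × Int)) (out : List (Int × Int × List (String × Int))) : Prop := out = gettorblocks4_alt basis
instance (basis : List (Int × Int × Int)) (out : List (Int × Int × List (String × Int))) : Decidable (Spec_gettorblocks4 basis out) := by unfold Spec_gettorblocks4; infer_instance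

-- ===== CLAIM (what is proved, stated in full; the proofs are below) =====
def Claim_equal_gettorblocks4 : Prop := ∀ (basis : List (Int × Int × Int)), Dom_gettorblocks4 basis → Spec_gettorblocks4 basis (gettorblocks4 basis)

-- ===== LEMMAS AND PROOFS =====

-- the aggregate of a group's index list, as A's inner dict
def aggD (xs : List Int) : PySem.Dict String Int :=
  PySem.Dict.mk [("start", xs.headD 0), ("end", xs.getLastD 0), ("count", (xs.length : Int))]

theorem ofList_lit (idx : Int) :
    PySem.Dict.ofList [("start", idx), ("end", idx), ("count", 1)] = aggD [idx] := by
  rfl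

set_option maxRecDepth 4000 in
theorem aggD_step (xs : List Int) (hxs : xs ≠ []) (idx : Int) :
    (let i1 := (aggD xs).insert "end" idx;
     i1.insert "count" (i1.getD "count" 0 + 1)) = aggD (xs ++ [idx]) := by
  cases xs with
  | nil => exact absurd rfl hxs
  | cons a t =>
    have h2 : (a :: (t ++ [idx])).getLast? = some idx := by
      rw [← List.cons_append, List.getLast?_concat]
    simp [aggD, PySem.Dict.insert, PySem.Dict.contains, PySem.Dict.getD, PySem.Dict.get?, h2]

theorem get?_of_items_map (dA : PySem.Dict (Int × Int) (PySem.Dict String Int))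
    (dB : PySem.Dict (Int × Int) (List Int)) (k : Int × Int)
    (h : dA.items = dB.items.map (fun p => (p.1, aggD p.2))) :
    dA.get? k = (dB.get? k).map aggD := by
  simp only [PySem.Dict.get?, h, List.find?_map, Option.map_map]
  rfl

theorem contains_of_items_map (dA : PySem.Dict (Int × Int) (PySem.Dict String Int))
    (dB : PySem.Dict (Int × Int) (List Int)) (k : Int × Int)
    (h : dA.items = dB.items.map (fun p => (p.1, aggD p.2))) :
    dA.contains k = dB.contains k := by
  simp only [PySem.Dict.contains, h, List.any_map]
  rfl

theorem loop_rel (l : List (Int × (Int × Int × Int)))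
    (dA : PySem.Dict (Int × Int) (PySem.Dict String Int))
    (dB : PySem.Dict (Int × Int) (List Int))
    (h : dA.items = dB.items.map (fun p => (p.1, aggD p.2)))
    (hne : ∀ p ∈ dB.items, p.2 ≠ []) :
    (l.foldl gettorAStep dA).items
      = (l.foldl gettorBStep dB).items.map (fun p => (p.1, aggD p.2)) := by
  induction l generalizing dA dB with
  | nil => simpa using h
  | cons hd tl ih =>
    simp only [List.foldl_cons]
    set k : Int × Int := (hd.2.2.1, hd.2.2.2) with hk
    have hcont := contains_of_items_map dA dB k h
    by_cases hc : dB.contains k = true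
    · -- key present: both overwrite in place
      have hcA : dA.contains k = true := by rw [hcont]; exact hc
      -- dB.get? k = some vB with vB ≠ []
      obtain ⟨vB, hvB⟩ : ∃ vB, dB.get? k = some vB := by
        rcases hq : dB.get? k with _ | vB
        · exfalso
          have := PySem.Dict.get?_eq_none_iff_contains (d := dB) (k := k)
          simp [hq, hc] at this
        · exact ⟨vB, rfl⟩
      have hvBne : vB ≠ [] := by
        have hmem := PySem.Dict.mem_items_of_get?_eq_some (d := dB) (k := k) (v := vB) hvB
        exact hne _ hmem
      have hgA : dA.getD k PySem.Dict.empty = aggD vB := by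
        simp [PySem.Dict.getD, get?_of_items_map dA dB k h, hvB]
      have hgB : dB.getD k [] = vB := by simp [PySem.Dict.getD, hvB]
      have hstepA : gettorAStep dA hd = dA.insert k (aggD (vB ++ [hd.1])) := by
        simp only [gettorAStep, ← hk, hcA]
        simp only [Bool.true_eq_false, if_false, PySem.Dict.modify]
        rw [hgA, PySem.Dict.getD_insert_self, PySem.Dict.insert_insert_self]
        rw [aggD_step vB hvBne hd.1]
      have hstepB : gettorBStep dB hd = dB.insert k (vB ++ [hd.1]) := by
        simp only [gettorBStep, ← hk, PySem.Dict.modify, hgB]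
      rw [hstepA, hstepB]
      apply ih
      · rw [PySem.Dict.items_insert_of_contains _ _ hcA,
            PySem.Dict.items_insert_of_contains _ _ hc, h, List.map_map, List.map_map]
        apply List.map_congr_left
        intro p _
        by_cases hpk : p.1 = k <;> simp [hpk]
      · intro p hp
        rcases (PySem.Dict.mem_items_insert dB _ _ p).mp hp with hE | ⟨hm, _⟩
        · subst hE; simp
        · exact hne _ hm
    · -- new key: both append
      have hcB : dB.contains k = false := by simpa using hc
      have hcA : dA.contains k = false := by rw [hcont]; simpa using hc
      have hstepA : gettorAStep dA hd = dA.insert k (aggD [hd.1]) := by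
        simp only [gettorAStep, ← hk, hcA, if_true, ofList_lit]
      have hstepB : gettorBStep dB hd = dB.insert k [hd.1] := by
        simp only [gettorBStep, ← hk, PySem.Dict.modify,
          PySem.Dict.getD_of_not_contains _ _ hcB, List.nil_append]
      rw [hstepA, hstepB]
      apply ih
      · rw [PySem.Dict.items_insert_of_not_contains _ _ hcA,
            PySem.Dict.items_insert_of_not_contains _ _ hcB, h, List.map_append]
        rfl
      · intro p hp
        rcases (PySem.Dict.mem_items_insert dB _ _ p).mp hp with hE | ⟨hm, _⟩
        · subst hE; simp
        · exact hne _ hm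

-- ===== VERDICT (by name: the statement is the Claim_ definition above) =====
theorem gettorblocks4_spec : Claim_equal_gettorblocks4 := by
  intro basis _
  unfold Spec_gettorblocks4 gettorblocks4 gettorblocks4_alt
  rw [loop_rel _ PySem.Dict.empty PySem.Dict.empty (by rfl) (by intro p hp; simp [PySem.Dict.empty] at hp)]
  rw [List.map_map]
  apply List.map_congr_left
  intro p _
  rfl
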